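-- pv_equiv track=rewrite | github.com/harleyndavis/AdventOfCode2025 | Day4/day4.py | solve_part2_differential
-- ===== SOURCE A (Python) =====
-- from typing import List, Optional
--
-- def removable_at_symbols(
--     data: List[List[str]], i: int, j: int, rows: int, cols: int
-- ) -> int:
--     """Count surrounding '@' symbols and return 1 if less than 4, 0 otherwise.
--
--     Args:
--         data: 2D grid of characters
--         i: Row index
--         j: Column index
--         rows: Total number of rows in the grid
--         cols: Total number of columns in the grid
--
--     Returns:
--         1 if "removable", less than 4 '@' symbols around position, 0 otherwise
--     """
--     # Filter before function call instead of checking here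
--     # if data[i][j] != "@":
--     #   return 0
--
--     # Check all 8 directions around the current position
--     at_count = 0
--     directions = [(-1, -1), (-1, 0), (-1, 1), (0, -1), (0, 1), (1, -1), (1, 0), (1, 1)]
--
--     for di, dj in directions:
--         ni, nj = i + di, j + dj
--         # Check if the position is within bounds
--         if 0 <= ni < rows and 0 <= nj < cols:
--             if data[ni][nj] == "@":
--                 at_count += 1
--
--             # Suggested optimization, did not improve performance in testing
--             if at_count >= 4:
--                 return 0  # No need to count further
--
--     # If there are less than four '@' around, return 1
--     return 1
--
-- def solve_part2_differential(data: List[List[str]]) -> int: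
--     """Solve part 2 using differential updates - only recheck cells affected by removals.
--
--     Args:
--         data: 2D grid of characters
--
--     Returns:
--         Solution for part 2
--     """
--     if not data:
--         return 0
--
--     rows, cols = len(data), len(data[0])
--
--     # Build initial set of '@' positions
--     at_positions = set()
--     for i in range(rows):
--         for j in range(cols):
--             if data[i][j] == "@":
--                 at_positions.add((i, j))
--
--     # Initially check all '@' positions
--     cells_to_check = set(at_positions)
--     result = 0
--
--     while cells_to_check:
--         removals = []
--         next_check = set()
--
--         # Only check cells that might have changed status
--         for i, j in cells_to_check:
--             if (i, j) in at_positions and removable_at_symbols(data, i, j, rows, cols):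
--                 removals.append((i, j))
--
--         if not removals:
--             break
--
--         # Remove cells and determine which neighbors need rechecking
--         for i, j in removals:
--             data[i][j] = "."
--             at_positions.remove((i, j))
--
--             # Add neighbors to recheck list (they might become removable now)
--             for di in [-1, 0, 1]:
--                 for dj in [-1, 0, 1]:
--                     if di == 0 and dj == 0:  # Skip center cell
--                         continue
--                     ni, nj = i + di, j + dj
--                     if 0 <= ni < rows and 0 <= nj < cols and (ni, nj) in at_positions:
--                         next_check.add((ni, nj))
--
--         cells_to_check = next_check
--         result += len(removals)
--
--     return result
-- ===== SOURCE B (Python) =====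
-- from typing import List
--
--
-- def solve_part2_differential(data: List[List[str]]) -> int:
--     """Simple full-grid peeling: each round rescan the whole grid, remove every
--     '@' cell with fewer than 4 '@' neighbours simultaneously. Mutates data in
--     place exactly like the original."""
--     if not data:
--         return 0
--
--     rows, cols = len(data), len(data[0])
--     total = 0
--     while True:
--         removals = [
--             (i, j)
--             for i in range(rows)
--             for j in range(cols)
--             if data[i][j] == "@"
--             and sum(
--                 1
--                 for di in (-1, 0, 1)
--                 for dj in (-1, 0, 1)
--                 if (di or dj)
--                 and 0 <= i + di < rows
--                 and 0 <= j + dj < cols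
--                 and data[i + di][j + dj] == "@"
--             ) < 4
--         ]
--         if not removals:
--             return total
--         for i, j in removals:
--             data[i][j] = "."
--         total += len(removals)
-- ===== Notes on version B (the rewrite author's own statement) =====
-- stated objective: simpler
-- what changed: Replaced the differential worklist (set of '@' positions plus a dirty set of neighbours to recheck, with per-removal bookkeeping) by a plain fixed-point loop that rescans the whole grid each round, removes all removable cells simultaneously and stops when a round removes nothing.
import Mathlib
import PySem

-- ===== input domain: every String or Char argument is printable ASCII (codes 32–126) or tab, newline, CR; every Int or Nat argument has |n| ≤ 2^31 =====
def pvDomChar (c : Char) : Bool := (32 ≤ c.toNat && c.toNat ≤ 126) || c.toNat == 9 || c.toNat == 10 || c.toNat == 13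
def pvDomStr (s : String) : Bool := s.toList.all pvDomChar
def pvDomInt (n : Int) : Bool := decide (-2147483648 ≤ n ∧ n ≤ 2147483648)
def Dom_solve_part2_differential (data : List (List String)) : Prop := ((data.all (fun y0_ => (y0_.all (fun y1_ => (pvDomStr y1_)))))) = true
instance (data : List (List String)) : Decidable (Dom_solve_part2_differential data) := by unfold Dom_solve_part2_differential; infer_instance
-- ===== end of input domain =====

-- B replaces A's differential worklist (set of '@' cells plus a dirty set of neighbours to
-- recheck) by a plain fixed-point loop that rescans the whole grid each round (simpler, same
-- measured cost).  Both Pythons mutate `data` in place identically; the theorems are about the return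
-- value.

-- ===== PORT A =====

-- the `directions` list literal of removable_at_symbols
def pvDirs : List (Int × Int) :=
  [(-1, -1), (-1, 0), (-1, 1), (0, -1), (0, 1), (1, -1), (1, 0), (1, 1)]

-- data[i][j] as an Option (none = IndexError; every use below is guarded so that under
-- Pre_ it is always `some`)
def pvCell (data : List (List String)) (i j : Int) : Option String :=
  (PySem.List.pyGet? data i).bind (fun r => PySem.List.pyGet? r j)

-- the `for di, dj in directions` loop with its early `return 0`
def pvRasLoop (data : List (List String)) (i j rows cols : Int) :
    List (Int × Int) → Int → Int
  | [], _ => 1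
  | d :: rest, cnt =>
      let ni := i + d.1
      let nj := j + d.2
      if 0 ≤ ni ∧ ni < rows ∧ 0 ≤ nj ∧ nj < cols then
        let cnt' := if pvCell data ni nj = some "@" then cnt + 1 else cnt
        if 4 ≤ cnt' then 0 else pvRasLoop data i j rows cols rest cnt'
      else pvRasLoop data i j rows cols rest cnt

def removable_at_symbols (data : List (List String)) (i j rows cols : Int) : Int :=
  pvRasLoop data i j rows cols pvDirs 0

-- data[i][j] = v  (indices are nonnegative and in range at every call site)
def pvSet (data : List (List String)) (i j : Int) (v : String) : List (List String) :=
  PySem.List.pySetD data i (PySem.List.pySetD (PySem.List.pyGetD data i []) j v)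

-- the initial double loop building `at_positions`
def pvInitAt (data : List (List String)) (rows cols : Int) : PySem.Set (Int × Int) :=
  (PySem.List.pyRange 0 rows 1).foldl (fun s i =>
    (PySem.List.pyRange 0 cols 1).foldl (fun s j =>
      if pvCell data i j = some "@" then PySem.Set.add s (i, j) else s) s) PySem.Set.empty

-- body of `for i, j in removals:` — flattens the two `for di/dj in [-1,0,1]` loops over a
-- 9-offset list with the `continue` as a skip branch.  `at_positions.remove` is ported as
-- `discard` (every removed cell is present, so remove never raises).
def pvRemStep (rows cols : Int)
    (st : List (List String) × PySem.Set (Int × Int) × PySem.Set (Int × Int))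
    (p : Int × Int) :
    List (List String) × PySem.Set (Int × Int) × PySem.Set (Int × Int) :=
  let data' := pvSet st.1 p.1 p.2 "."
  let at' := PySem.Set.discard st.2.1 p
  let nc' := ([(-1, -1), (-1, 0), (-1, 1), (0, -1), (0, 0), (0, 1), (1, -1), (1, 0), (1, 1)] :
      List (Int × Int)).foldl (fun nc d =>
        if d.1 = 0 ∧ d.2 = 0 then nc
        else
          let ni := p.1 + d.1
          let nj := p.2 + d.2
          if 0 ≤ ni ∧ ni < rows ∧ 0 ≤ nj ∧ nj < cols ∧ PySem.Set.contains at' (ni, nj) then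
            PySem.Set.add nc (ni, nj)
          else nc) st.2.2
  (data', at', nc')

-- the `while cells_to_check` loop.  Python iterates `cells_to_check` in hash order; the port
-- iterates the Set's list — the return value is order-independent (that is what the
-- equivalence theorem below proves).  `fuel` only makes the recursion structural: it exceeds
-- the number of possible rounds (each non-final round empties ≥ 1 cell of the grid).
def pvALoop (rows cols : Int) :
    Nat → List (List String) → PySem.Set (Int × Int) → PySem.Set (Int × Int) → Int → Int
  | 0, _, _, _, result => result
  | fuel + 1, data, atPos, toCheck, result =>
      if toCheck = [] then result
      else
        let removals := toCheck.filter (fun p =>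
          PySem.Set.contains atPos p && removable_at_symbols data p.1 p.2 rows cols != 0)
        if removals = [] then result
        else
          let st := removals.foldl (pvRemStep rows cols) (data, atPos, PySem.Set.empty)
          pvALoop rows cols fuel st.1 st.2.1 st.2.2 (result + removals.length)

def solve_part2_differential (data : List (List String)) : Int :=
  if data = [] then 0
  else
    let rows : Int := data.length
    let cols : Int := (data.headD []).length
    let atPos := pvInitAt data rows cols
    pvALoop rows cols (data.length * (data.headD []).length + 1) data atPos atPos 0

-- ===== PORT B =====

-- sum(1 for di in (-1,0,1) for dj in (-1,0,1) if (di or dj) and in-bounds and '@')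
def pvCount (data : List (List String)) (rows cols i j : Int) : Int :=
  (([(-1, -1), (-1, 0), (-1, 1), (0, -1), (0, 0), (0, 1), (1, -1), (1, 0), (1, 1)] :
      List (Int × Int)).map (fun d =>
        if ¬(d.1 = 0 ∧ d.2 = 0) ∧ 0 ≤ i + d.1 ∧ i + d.1 < rows ∧ 0 ≤ j + d.2 ∧
            j + d.2 < cols ∧ pvCell data (i + d.1) (j + d.2) = some "@" then (1 : Int)
        else 0)).sum

-- the removals list comprehension (row-major scan of the whole grid)
def pvScan (data : List (List String)) (rows cols : Int) : List (Int × Int) :=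
  (PySem.List.pyRange 0 rows 1).flatMap (fun i =>
    ((PySem.List.pyRange 0 cols 1).filter (fun j =>
      decide (pvCell data i j = some "@" ∧ pvCount data rows cols i j < 4))).map
      (fun j => (i, j)))

-- the `while True` loop of B; same fuel remark as for pvALoop
def pvBLoop (rows cols : Int) : Nat → List (List String) → Int → Int
  | 0, _, total => total
  | fuel + 1, data, total =>
      let removals := pvScan data rows cols
      if removals = [] then total
      else
        pvBLoop rows cols fuel (removals.foldl (fun g p => pvSet g p.1 p.2 ".") data)
          (total + removals.length)

def solve_part2_differential_alt (data : List (List String)) : Int :=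
  if data = [] then 0
  else
    pvBLoop (data.length : Int) ((data.headD []).length : Int)
      (data.length * (data.headD []).length + 1) data 0

-- ===== PRECONDITION & SPEC =====

-- Pre_ excludes exactly the grids on which the Python A raises IndexError: a row shorter
-- than row 0 (both programs index every row at columns 0..len(data[0])-1; B raises there too).
def Pre_solve_part2_differential (data : List (List String)) : Prop :=
  ∀ r ∈ data, (data.headD []).length ≤ r.length

instance (data : List (List String)) : Decidable (Pre_solve_part2_differential data) := by
  unfold Pre_solve_part2_differential; infer_instance

def pvWitness_solve_part2_differential : List (List String) := [["@", "@"], ["@", "."]]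

def Spec_solve_part2_differential (data : List (List String)) (out : Int) : Prop :=
  out = solve_part2_differential_alt data

instance (data : List (List String)) (out : Int) :
    Decidable (Spec_solve_part2_differential data out) := by
  unfold Spec_solve_part2_differential; infer_instance

-- ===== CLAIM (what is proved, stated in full; the proofs are below) =====
def Claim_equal_solve_part2_differential : Prop :=
  ∀ (data : List (List String)), Dom_solve_part2_differential data →
    Pre_solve_part2_differential data →
    Spec_solve_part2_differential data (solve_part2_differential data)

-- ===== LEMMAS AND PROOFS =====

-- ---- proof-only vocabulary ----

abbrev pvInB (rows cols : Int) (p : Int × Int) : Prop :=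
  0 ≤ p.1 ∧ p.1 < rows ∧ 0 ≤ p.2 ∧ p.2 < cols

def pvShape (rows cols : Int) (g : List (List String)) : Prop :=
  (g.length : Int) = rows ∧ 0 ≤ cols ∧ ∀ r ∈ g, cols ≤ (r.length : Int)

def pvOffs9 : List (Int × Int) :=
  [(-1, -1), (-1, 0), (-1, 1), (0, -1), (0, 0), (0, 1), (1, -1), (1, 0), (1, 1)]

def pvInd (g : List (List String)) (rows cols i j : Int) (d : Int × Int) : Int :=
  if pvInB rows cols (i + d.1, j + d.2) ∧ pvCell g (i + d.1) (j + d.2) = some "@" then 1 else 0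

def pvCnt (g : List (List String)) (rows cols i j : Int) : Int :=
  (pvDirs.map (pvInd g rows cols i j)).sum

def pvNbr (p q : Int × Int) : Prop :=
  q ≠ p ∧ -1 ≤ q.1 - p.1 ∧ q.1 - p.1 ≤ 1 ∧ -1 ≤ q.2 - p.2 ∧ q.2 - p.2 ≤ 1

def pvCellN (g : List (List String)) (a b : Nat) : Option String :=
  g[a]?.bind (fun r => r[b]?)

def pvRemAll (g : List (List String)) (L : List (Int × Int)) : List (List String) :=
  L.foldl (fun h p => pvSet h p.1 p.2 ".") g

def pvPairStep (rows cols : Int) (s : PySem.Set (Int × Int) × PySem.Set (Int × Int))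
    (p : Int × Int) : PySem.Set (Int × Int) × PySem.Set (Int × Int) :=
  let at' := PySem.Set.discard s.1 p
  (at', pvOffs9.foldl (fun nc d =>
      if d.1 = 0 ∧ d.2 = 0 then nc
      else
        if 0 ≤ p.1 + d.1 ∧ p.1 + d.1 < rows ∧ 0 ≤ p.2 + d.2 ∧ p.2 + d.2 < cols ∧
            PySem.Set.contains at' (p.1 + d.1, p.2 + d.2) then
          PySem.Set.add nc (p.1 + d.1, p.2 + d.2)
        else nc) s.2)

-- ---- counting ----

theorem pvInd_nonneg (g : List (List String)) (rows cols i j : Int) (d : Int × Int) :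
    0 ≤ pvInd g rows cols i j d := by
  unfold pvInd; split <;> omega

theorem pvSum_nonneg (g : List (List String)) (rows cols i j : Int) (ds : List (Int × Int)) :
    0 ≤ (ds.map (pvInd g rows cols i j)).sum := by
  induction ds with
  | nil => simp
  | cons d t ih => simp only [List.map_cons, List.sum_cons]
                   have := pvInd_nonneg g rows cols i j d; omega

theorem pvRasLoop_eq (g : List (List String)) (i j rows cols : Int) :
    ∀ (ds : List (Int × Int)) (cnt : Int),
      cnt < 4 →
      pvRasLoop g i j rows cols ds cnt =
        if cnt + (ds.map (pvInd g rows cols i j)).sum < 4 then 1 else 0 := by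
  intro ds
  induction ds with
  | nil => intro cnt hcnt; simp [pvRasLoop]; omega
  | cons d t ih =>
    intro cnt hcnt
    have hnn := pvSum_nonneg g rows cols i j t
    show (if 0 ≤ i + d.1 ∧ i + d.1 < rows ∧ 0 ≤ j + d.2 ∧ j + d.2 < cols then
        if 4 ≤ (if pvCell g (i + d.1) (j + d.2) = some "@" then cnt + 1 else cnt) then (0:Int)
        else pvRasLoop g i j rows cols t
          (if pvCell g (i + d.1) (j + d.2) = some "@" then cnt + 1 else cnt)
      else pvRasLoop g i j rows cols t cnt) = _
    by_cases hb : 0 ≤ i + d.1 ∧ i + d.1 < rows ∧ 0 ≤ j + d.2 ∧ j + d.2 < cols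
    · rw [if_pos hb]
      by_cases hc : pvCell g (i + d.1) (j + d.2) = some "@"
      · have hind : pvInd g rows cols i j d = 1 := by
          unfold pvInd; rw [if_pos]; exact ⟨hb, hc⟩
        rw [if_pos hc]; simp only [List.map_cons, List.sum_cons, hind]
        by_cases h4 : 4 ≤ cnt + 1
        · rw [if_pos h4, if_neg (by omega)]
        · rw [if_neg h4, ih _ (by omega), ← add_assoc]
      · have hind : pvInd g rows cols i j d = 0 := by
          unfold pvInd; rw [if_neg]; rintro ⟨_, hc'⟩; exact hc hc'
        rw [if_neg hc]; simp only [List.map_cons, List.sum_cons, hind]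
        rw [if_neg (by omega), ih _ hcnt, zero_add]
    · have hind : pvInd g rows cols i j d = 0 := by
        unfold pvInd; rw [if_neg]; rintro ⟨hb', _⟩; exact hb hb'
      rw [if_neg hb, ih _ hcnt]; simp only [List.map_cons, List.sum_cons, hind, zero_add]

theorem removable_eq (g : List (List String)) (i j rows cols : Int) :
    removable_at_symbols g i j rows cols = if pvCnt g rows cols i j < 4 then 1 else 0 := by
  rw [removable_at_symbols, pvRasLoop_eq g i j rows cols pvDirs 0 (by norm_num), zero_add, pvCnt]

theorem pvCount_eq (g : List (List String)) (rows cols i j : Int) :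
    pvCount g rows cols i j = pvCnt g rows cols i j := by
  simp only [pvCount, pvCnt, pvDirs, pvInd, List.map_cons, List.map_nil, List.sum_cons,
    List.sum_nil]
  dsimp only [pvInB]
  norm_num
  simp [and_assoc]

theorem pvCnt_congr (g1 g2 : List (List String)) (rows cols i j : Int)
    (h : ∀ d ∈ pvDirs, pvInB rows cols (i + d.1, j + d.2) →
      pvCell g1 (i + d.1) (j + d.2) = pvCell g2 (i + d.1) (j + d.2)) :
    pvCnt g1 rows cols i j = pvCnt g2 rows cols i j := by
  unfold pvCnt
  congr 1
  apply List.map_congr_left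
  intro d hd
  unfold pvInd
  by_cases hb : pvInB rows cols (i + d.1, j + d.2)
  · rw [h d hd hb]
  · rw [if_neg (by rintro ⟨hb', _⟩; exact hb hb'), if_neg (by rintro ⟨hb', _⟩; exact hb hb')]

theorem mem_pvDirs (d : Int × Int) :
    d ∈ pvDirs ↔ ¬(d.1 = 0 ∧ d.2 = 0) ∧ -1 ≤ d.1 ∧ d.1 ≤ 1 ∧ -1 ≤ d.2 ∧ d.2 ≤ 1 := by
  cases d with
  | mk a b => simp [pvDirs, Prod.ext_iff]; omega

theorem pvCell_toNat (g : List (List String)) (i j : Int) (hi : 0 ≤ i) (hj : 0 ≤ j) :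
    pvCell g i j = pvCellN g i.toNat j.toNat := by
  rw [pvCell, pvCellN, PySem.List.pyGet?_of_nonneg _ hi]
  cases h : g[i.toNat]? with
  | none => rfl
  | some r => simp [PySem.List.pyGet?_of_nonneg _ hj]

theorem pvSet_eq_set (g : List (List String)) (i j : Int) (v : String)
    (hi0 : 0 ≤ i) (hj0 : 0 ≤ j) (hi : i.toNat < g.length) :
    pvSet g i j v = g.set i.toNat ((g[i.toNat]).set j.toNat v) := by
  rw [pvSet, PySem.List.pySetD_of_nonneg _ _ hi0, PySem.List.pySetD_of_nonneg _ _ hj0]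
  congr 1
  rw [PySem.List.pyGetD, PySem.List.pyGet?_of_nonneg _ hi0]
  simp [List.getElem?_eq_getElem hi]

-- single-cell characterization
theorem pvSet_char (rows cols : Int) (g : List (List String)) (p : Int × Int) (v : String)
    (hp : pvInB rows cols p) (hs : pvShape rows cols g) :
    (pvSet g p.1 p.2 v).map List.length = g.map List.length ∧
    ∀ a b : Nat, pvCellN (pvSet g p.1 p.2 v) a b =
      if (a : Int) = p.1 ∧ (b : Int) = p.2 then some v else pvCellN g a b := by
  obtain ⟨hp1, hp2, hp3, hp4⟩ := hp
  obtain ⟨hl, hc0, hrow⟩ := hs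
  have hilt : p.1.toNat < g.length := by omega
  have hjr : p.2.toNat < (g[p.1.toNat]).length := by
    have := hrow _ (List.getElem_mem hilt); omega
  rw [pvSet_eq_set g p.1 p.2 v hp1 hp3 hilt]
  constructor
  · apply List.ext_getElem (by simp)
    intro n h1 h2
    simp only [List.getElem_map, List.getElem_set]
    split
    · next h => subst h; simp
    · rfl
  · intro a b
    rw [pvCellN, pvCellN]
    by_cases ha : a = p.1.toNat
    · subst ha
      rw [List.getElem?_set_self (by omega)]
      simp only [Option.bind_some]
      by_cases hb : b = p.2.toNat
      · subst hb
        rw [List.getElem?_set_self (by omega), if_pos (by omega)]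
      · rw [List.getElem?_set_ne (by omega), if_neg (by omega),
          List.getElem?_eq_getElem hilt]
        rfl
    · rw [List.getElem?_set_ne (by omega), if_neg (by omega)]

theorem pvShape_of_map_length (rows cols : Int) (g h : List (List String))
    (hm : h.map List.length = g.map List.length) (hs : pvShape rows cols g) :
    pvShape rows cols h := by
  obtain ⟨hl, hc0, hrow⟩ := hs
  have hlen : h.length = g.length := by
    have := congrArg List.length hm; simpa using this
  refine ⟨by rw [hlen]; exact hl, hc0, ?_⟩
  intro r hr
  obtain ⟨n, hn, rfl⟩ := List.getElem_of_mem hr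
  have : (h.map List.length)[n]? = (g.map List.length)[n]? := by rw [hm]
  rw [List.getElem?_map, List.getElem?_map] at this
  have hng : n < g.length := by omega
  rw [List.getElem?_eq_getElem hn, List.getElem?_eq_getElem hng] at this
  simp only [Option.map_some, Option.some_inj] at this
  rw [this]
  exact hrow _ (List.getElem_mem hng)

theorem pvRemAll_full (rows cols : Int) :
    ∀ (L : List (Int × Int)) (g : List (List String)),
      (∀ p ∈ L, pvInB rows cols p) → pvShape rows cols g →
      (pvRemAll g L).map List.length = g.map List.length ∧
      ∀ a b : Nat, pvCellN (pvRemAll g L) a b =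
        if ((a : Int), (b : Int)) ∈ L then some "." else pvCellN g a b := by
  intro L
  induction L with
  | nil => intro g _ _; exact ⟨rfl, by intro a b; simp [pvRemAll]⟩
  | cons p t ih =>
    intro g hL hs
    have hp := hL p (by simp)
    have hset := pvSet_char rows cols g p "." hp hs
    have hs' : pvShape rows cols (pvSet g p.1 p.2 ".") :=
      pvShape_of_map_length rows cols g _ hset.1 hs
    have hrem : pvRemAll g (p :: t) = pvRemAll (pvSet g p.1 p.2 ".") t := rfl
    obtain ⟨ih1, ih2⟩ := ih (pvSet g p.1 p.2 ".") (fun q hq => hL q (by simp [hq])) hs'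
    constructor
    · rw [hrem, ih1, hset.1]
    · intro a b
      rw [hrem, ih2 a b]
      by_cases hm : ((a : Int), (b : Int)) ∈ t
      · rw [if_pos hm, if_pos (by simp [hm])]
      · rw [if_neg hm, hset.2 a b]
        by_cases he : ((a : Int), (b : Int)) = p
        · rw [Prod.ext_iff] at he
          rw [if_pos he, if_pos (List.mem_cons.mpr (Or.inl (Prod.ext_iff.mpr he)))]
        · rw [if_neg (by rw [Prod.ext_iff] at he; tauto), if_neg (by simp [he, hm])]

theorem pvRemAll_ext (rows cols : Int) (g : List (List String)) (L1 L2 : List (Int × Int))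
    (h1 : ∀ p ∈ L1, pvInB rows cols p) (h2 : ∀ p ∈ L2, pvInB rows cols p)
    (hs : pvShape rows cols g) (hm : ∀ p, p ∈ L1 ↔ p ∈ L2) :
    pvRemAll g L1 = pvRemAll g L2 := by
  obtain ⟨s1, c1⟩ := pvRemAll_full rows cols L1 g h1 hs
  obtain ⟨s2, c2⟩ := pvRemAll_full rows cols L2 g h2 hs
  have hlen : (pvRemAll g L1).length = (pvRemAll g L2).length := by
    have := congrArg List.length (s1.trans s2.symm); simpa using this
  apply List.ext_getElem hlen
  intro n hn1 hn2
  have hrl : (pvRemAll g L1)[n].length = (pvRemAll g L2)[n].length := by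
    have h12 := s1.trans s2.symm
    have : (pvRemAll g L1).map List.length = (pvRemAll g L2).map List.length := h12
    have := congrArg (fun l => l[n]?) this
    simp only [List.getElem?_map, List.getElem?_eq_getElem hn1,
      List.getElem?_eq_getElem hn2, Option.map_some, Option.some_inj] at this
    exact this
  apply List.ext_getElem hrl
  intro b hb1 hb2
  have : pvCellN (pvRemAll g L1) n b = pvCellN (pvRemAll g L2) n b := by
    rw [c1, c2]; exact if_congr (hm _) rfl rfl
  rw [pvCellN, pvCellN, List.getElem?_eq_getElem hn1, List.getElem?_eq_getElem hn2] at this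
  simp only [Option.bind_some] at this
  rw [List.getElem?_eq_getElem hb1, List.getElem?_eq_getElem hb2] at this
  simpa using this

theorem mem_foldl_of_step {κ β : Type} (step : List κ → β → List κ) (P : β → κ → Prop)
    (h : ∀ s x q, q ∈ step s x ↔ q ∈ s ∨ P x q) :
    ∀ (l : List β) (s0 : List κ) (q : κ),
      q ∈ l.foldl step s0 ↔ q ∈ s0 ∨ ∃ x ∈ l, P x q := by
  intro l
  induction l with
  | nil => intro s0 q; simp
  | cons x t ih =>
    intro s0 q
    rw [List.foldl_cons, ih, h]
    constructor
    · rintro ((hq | hp) | ⟨y, hy, hp⟩)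
      · exact Or.inl hq
      · exact Or.inr ⟨x, by simp, hp⟩
      · exact Or.inr ⟨y, by simp [hy], hp⟩
    · rintro (hq | ⟨y, hy, hp⟩)
      · exact Or.inl (Or.inl hq)
      · rcases List.mem_cons.mp hy with rfl | hy'
        · exact Or.inl (Or.inr hp)
        · exact Or.inr ⟨y, hy', hp⟩

theorem nodup_foldl_of_step {κ β : Type} (step : List κ → β → List κ)
    (h : ∀ s x, s.Nodup → (step s x).Nodup) :
    ∀ (l : List β) (s0 : List κ), s0.Nodup → (l.foldl step s0).Nodup := by
  intro l
  induction l with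
  | nil => intro s0 hs; exact hs
  | cons x t ih => intro s0 hs; exact ih _ (h _ _ hs)

-- ---- the A-side data structures ----

theorem mem_pvInitAt (rows cols : Int) (g : List (List String)) (p : Int × Int) :
    p ∈ pvInitAt g rows cols ↔ pvInB rows cols p ∧ pvCell g p.1 p.2 = some "@" := by
  have hinner : ∀ (i : Int) (s : PySem.Set (Int × Int)) (q : Int × Int),
      q ∈ (PySem.List.pyRange 0 cols 1).foldl (fun s j =>
        if pvCell g i j = some "@" then PySem.Set.add s (i, j) else s) s ↔
      q ∈ s ∨ ∃ j ∈ PySem.List.pyRange 0 cols 1, pvCell g i j = some "@" ∧ q = (i, j) := by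
    intro i s q
    apply mem_foldl_of_step (P := fun j q => pvCell g i j = some "@" ∧ q = (i, j))
    intro s' j q'
    split
    · next hc => rw [PySem.Set.mem_add]; tauto
    · next hc => constructor
                 · exact Or.inl
                 · rintro (h | ⟨hc', _⟩); exact h; exact absurd hc' hc
  have houter : ∀ q, q ∈ pvInitAt g rows cols ↔
      q ∈ (PySem.Set.empty : PySem.Set (Int × Int)) ∨
      ∃ i ∈ PySem.List.pyRange 0 rows 1, ∃ j ∈ PySem.List.pyRange 0 cols 1,
        pvCell g i j = some "@" ∧ q = (i, j) := by
    intro q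
    apply mem_foldl_of_step
      (P := fun i q => ∃ j ∈ PySem.List.pyRange 0 cols 1, pvCell g i j = some "@" ∧ q = (i, j))
    intro s' i q'
    exact hinner i s' q'
  rw [houter]
  simp only [PySem.Set.empty, List.not_mem_nil, false_or, PySem.List.mem_pyRange_one]
  constructor
  · rintro ⟨i, ⟨hi0, hir⟩, j, ⟨hj0, hjc⟩, hc, rfl⟩
    exact ⟨⟨hi0, hir, hj0, hjc⟩, hc⟩
  · rintro ⟨⟨h1, h2, h3, h4⟩, hc⟩
    exact ⟨p.1, ⟨h1, h2⟩, p.2, ⟨h3, h4⟩, hc, rfl⟩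

theorem nodup_pvInitAt (rows cols : Int) (g : List (List String)) :
    (pvInitAt g rows cols).Nodup := by
  apply nodup_foldl_of_step
  · intro s i hs
    apply nodup_foldl_of_step
    · intro s' j hs'
      split
      · exact PySem.Set.nodup_add _ _ hs'
      · exact hs'
    · exact hs
  · exact List.nodup_nil

theorem remFold_fst (rows cols : Int) (L : List (Int × Int)) (g : List (List String))
    (a n : PySem.Set (Int × Int)) :
    (L.foldl (pvRemStep rows cols) (g, a, n)).1 = pvRemAll g L := by
  induction L generalizing g a n with
  | nil => rfl
  | cons p t ih => exact ih (pvSet g p.1 p.2 ".") _ _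

theorem remFold_snd (rows cols : Int) (L : List (Int × Int)) (g : List (List String))
    (a n : PySem.Set (Int × Int)) :
    (L.foldl (pvRemStep rows cols) (g, a, n)).2 = L.foldl (pvPairStep rows cols) (a, n) := by
  induction L generalizing g a n with
  | nil => rfl
  | cons p t ih => exact ih (pvSet g p.1 p.2 ".") _ _

theorem mem_nbrStep (rows cols : Int) (a' nc : PySem.Set (Int × Int)) (p q : Int × Int) :
    q ∈ (pvPairStep rows cols (a', nc) p).2 ↔
      q ∈ nc ∨ (pvNbr p q ∧ pvInB rows cols q ∧ q ∈ PySem.Set.discard a' p) := by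
  have hstep := mem_foldl_of_step
    (step := fun nc (d : Int × Int) =>
      if d.1 = 0 ∧ d.2 = 0 then nc
      else
        if 0 ≤ p.1 + d.1 ∧ p.1 + d.1 < rows ∧ 0 ≤ p.2 + d.2 ∧ p.2 + d.2 < cols ∧
            PySem.Set.contains (PySem.Set.discard a' p) (p.1 + d.1, p.2 + d.2) then
          PySem.Set.add nc (p.1 + d.1, p.2 + d.2)
        else nc)
    (P := fun (d : Int × Int) q => ¬(d.1 = 0 ∧ d.2 = 0) ∧
      (0 ≤ p.1 + d.1 ∧ p.1 + d.1 < rows ∧ 0 ≤ p.2 + d.2 ∧ p.2 + d.2 < cols) ∧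
      (p.1 + d.1, p.2 + d.2) ∈ PySem.Set.discard a' p ∧ q = (p.1 + d.1, p.2 + d.2))
    (by
      intro s x q'
      dsimp only
      split
      · next h0 => constructor
                   · exact Or.inl
                   · rintro (h | ⟨h0', _⟩); exact h; exact absurd h0 h0'
      · next h0 =>
        split
        · next hc =>
          rw [PySem.Set.mem_add]
          constructor
          · rintro (h | rfl)
            · exact Or.inl h
            · exact Or.inr ⟨h0, ⟨hc.1, hc.2.1, hc.2.2.1, hc.2.2.2.1⟩,
                (PySem.Set.contains_iff _ _).mp hc.2.2.2.2, rfl⟩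
          · rintro (h | ⟨_, _, _, rfl⟩)
            · exact Or.inl h
            · exact Or.inr rfl
        · next hc =>
          constructor
          · exact Or.inl
          · rintro (h | ⟨_, hb, hm, _⟩); exact h
            exact absurd ⟨hb.1, hb.2.1, hb.2.2.1, hb.2.2.2,
              (PySem.Set.contains_iff _ _).mpr hm⟩ hc)
    pvOffs9 nc q
  refine Iff.trans (show q ∈ (pvPairStep rows cols (a', nc) p).2 ↔ _ from hstep) ?_
  constructor
  · rintro (h | ⟨d, hd, hne, hb, hm, rfl⟩)
    · exact Or.inl h
    · have hdo : -1 ≤ d.1 ∧ d.1 ≤ 1 ∧ -1 ≤ d.2 ∧ d.2 ≤ 1 := by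
        simp only [pvOffs9, List.mem_cons, List.not_mem_nil, or_false] at hd
        rcases hd with rfl | rfl | rfl | rfl | rfl | rfl | rfl | rfl | rfl <;> norm_num
      refine Or.inr ⟨⟨?_, ?_, ?_, ?_, ?_⟩, ⟨hb.1, hb.2.1, hb.2.2.1, hb.2.2.2⟩, hm⟩
      · intro hqp
        rw [Prod.ext_iff] at hqp
        simp only [] at hqp
        exact hne ⟨by omega, by omega⟩
      all_goals simp only []; omega
  · rintro (h | ⟨⟨hne, hb1, hb2, hb3, hb4⟩, hinb, hm⟩)
    · exact Or.inl h
    · have hq' : (p.1 + (q.1 - p.1, q.2 - p.2).1, p.2 + (q.1 - p.1, q.2 - p.2).2) = q := by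
        have e1 : (q.1 - p.1, q.2 - p.2).1 = q.1 - p.1 := rfl
        have e2 : (q.1 - p.1, q.2 - p.2).2 = q.2 - p.2 := rfl
        rw [e1, e2]
        exact Prod.ext_iff.mpr ⟨by omega, by omega⟩
      obtain ⟨a1, a2, a3, a4⟩ := hinb
      refine Or.inr ⟨(q.1 - p.1, q.2 - p.2), ?_, ?_, ?_, ?_, ?_⟩
      · simp only [pvOffs9, List.mem_cons, List.not_mem_nil, or_false, Prod.ext_iff]
        try dsimp only
        omega
      · try dsimp only
        intro ⟨e1, e2⟩
        exact hne (Prod.ext_iff.mpr ⟨by omega, by omega⟩)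
      · try dsimp only
        refine ⟨by omega, by omega, by omega, by omega⟩
      · rw [hq']; exact hm
      · exact hq'.symm

theorem pairFold_fst (rows cols : Int) :
    ∀ (L : List (Int × Int)) (a n : PySem.Set (Int × Int)),
      (L.foldl (pvPairStep rows cols) (a, n)).1 = L.foldl PySem.Set.discard a := by
  intro L
  induction L with
  | nil => intro a n; rfl
  | cons p t ih => intro a n; exact ih _ _

theorem mem_discardFold (L : List (Int × Int)) (a : PySem.Set (Int × Int)) (q : Int × Int) :
    q ∈ L.foldl PySem.Set.discard a ↔ q ∈ a ∧ q ∉ L := by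
  induction L generalizing a with
  | nil => simp
  | cons p t ih =>
    rw [List.foldl_cons, ih, PySem.Set.mem_discard]
    simp only [List.mem_cons]
    tauto

theorem pairFold_snd_mono (rows cols : Int) :
    ∀ (L : List (Int × Int)) (a n : PySem.Set (Int × Int)) (q : Int × Int),
      q ∈ n → q ∈ (L.foldl (pvPairStep rows cols) (a, n)).2 := by
  intro L
  induction L with
  | nil => intro a n q h; exact h
  | cons p t ih =>
    intro a n q h
    exact ih _ _ q ((mem_nbrStep rows cols a n p q).mpr (Or.inl h))

theorem pairFold_snd_complete (rows cols : Int) :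
    ∀ (L : List (Int × Int)) (a n : PySem.Set (Int × Int)) (p q : Int × Int),
      p ∈ L → pvNbr p q → pvInB rows cols q → q ∈ a → q ∉ L →
        q ∈ (L.foldl (pvPairStep rows cols) (a, n)).2 := by
  intro L
  induction L with
  | nil => intro a n p q h; exact absurd h (List.not_mem_nil)
  | cons r t ih =>
    intro a n p q hpL hnbr hinb hqa hqL
    have hqr : q ≠ r := fun he => hqL (he ▸ List.mem_cons_self ..)
    have hqt : q ∉ t := fun ht => hqL (List.mem_cons.mpr (Or.inr ht))
    rcases List.mem_cons.mp hpL with rfl | hpt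
    · rw [List.foldl_cons]
      exact pairFold_snd_mono rows cols t (pvPairStep rows cols (a, n) p).1
        (pvPairStep rows cols (a, n) p).2 q
        ((mem_nbrStep rows cols a n p q).mpr
          (Or.inr ⟨hnbr, hinb, (PySem.Set.mem_discard _ _ _).mpr ⟨hqa, hqr⟩⟩))
    · exact ih _ _ p q hpt hnbr hinb ((PySem.Set.mem_discard _ _ _).mpr ⟨hqa, hqr⟩) hqt

theorem pairFold_snd_nodup (rows cols : Int) (L : List (Int × Int))
    (a n : PySem.Set (Int × Int)) (hn : n.Nodup) :
    (L.foldl (pvPairStep rows cols) (a, n)).2.Nodup := by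
  induction L generalizing a n with
  | nil => exact hn
  | cons p t ih =>
    apply ih
    apply nodup_foldl_of_step _ _ pvOffs9 _ hn
    intro s x hs
    split
    · exact hs
    · split
      · exact PySem.Set.nodup_add _ _ hs
      · exact hs

-- ---- the B-side scan ----

theorem mem_pvScan (g : List (List String)) (rows cols : Int) (p : Int × Int) :
    p ∈ pvScan g rows cols ↔
      pvInB rows cols p ∧ pvCell g p.1 p.2 = some "@" ∧ pvCnt g rows cols p.1 p.2 < 4 := by
  simp only [pvScan, List.mem_flatMap, List.mem_map, List.mem_filter,
    PySem.List.mem_pyRange_one, decide_eq_true_eq, pvCount_eq]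
  constructor
  · rintro ⟨i, ⟨hi0, hir⟩, j, ⟨⟨hj0, hjc⟩, hc, hcnt⟩, rfl⟩
    exact ⟨⟨hi0, hir, hj0, hjc⟩, hc, hcnt⟩
  · rintro ⟨⟨h1, h2, h3, h4⟩, hc, hcnt⟩
    exact ⟨p.1, ⟨h1, h2⟩, p.2, ⟨⟨h3, h4⟩, hc, hcnt⟩, rfl⟩

theorem nodup_flatMap_keyed (f : Int → List (Int × Int))
    (hf : ∀ i, (f i).Nodup) (hk : ∀ i q, q ∈ f i → q.1 = i) :
    ∀ (l : List Int), l.Pairwise (· < ·) → (l.flatMap f).Nodup := by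
  intro l
  induction l with
  | nil => intro _; simp
  | cons x t ih =>
    intro hpw
    rcases List.pairwise_cons.mp hpw with ⟨hx, ht⟩
    rw [List.flatMap_cons, List.nodup_append]
    refine ⟨hf x, ih ht, fun q hq y hy' => ?_⟩
    intro he
    subst he
    obtain ⟨z, hz, hqz⟩ := List.mem_flatMap.mp hy'
    have h1 : q.1 = x := hk x q hq
    have h2 : q.1 = z := hk z q hqz
    exact (ne_of_lt (hx z hz)) (h1.symm.trans h2)

theorem nodup_pvScan (g : List (List String)) (rows cols : Int) :
    (pvScan g rows cols).Nodup := by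
  rw [pvScan]
  apply nodup_flatMap_keyed
  · intro i
    apply List.Nodup.map
    · intro u v h; simpa using congrArg Prod.snd h
    · exact List.Nodup.filter _ (PySem.List.nodup_pyRange_one 0 cols)
  · intro i q hq
    obtain ⟨j, _, rfl⟩ := List.mem_map.mp hq
    rfl
  · exact PySem.List.pairwise_lt_pyRange_one 0 rows

-- ---- the main loop equivalence ----

theorem loop_eq (rows cols : Int) :
    ∀ (fuel : Nat) (g : List (List String)) (atPos toCheck : PySem.Set (Int × Int)) (res : Int),
      pvShape rows cols g →
      (∀ p, p ∈ atPos ↔ pvInB rows cols p ∧ pvCell g p.1 p.2 = some "@") →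
      (∀ p, p ∈ atPos → pvCnt g rows cols p.1 p.2 < 4 → p ∈ toCheck) →
      atPos.Nodup → toCheck.Nodup →
      pvALoop rows cols fuel g atPos toCheck res = pvBLoop rows cols fuel g res := by
  intro fuel
  induction fuel with
  | zero => intro g atPos toCheck res _ _ _ _ _; rfl
  | succ fuel ih =>
    intro g atPos toCheck res hs hA hC hndA hndC
    have hRA : ∀ p, p ∈ toCheck.filter (fun p =>
        PySem.Set.contains atPos p && removable_at_symbols g p.1 p.2 rows cols != 0) ↔
        p ∈ atPos ∧ pvCnt g rows cols p.1 p.2 < 4 := by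
      intro p
      rw [List.mem_filter]
      constructor
      · rintro ⟨htc, hcond⟩
        rw [Bool.and_eq_true] at hcond
        obtain ⟨h1, h2⟩ := hcond
        have hp : p ∈ atPos := (PySem.Set.contains_iff _ _).mp h1
        refine ⟨hp, ?_⟩
        rw [bne_iff_ne, removable_eq] at h2
        by_contra h4
        rw [if_neg h4] at h2
        exact h2 rfl
      · rintro ⟨hp, h4⟩
        refine ⟨hC p hp h4, ?_⟩
        rw [Bool.and_eq_true]
        refine ⟨(PySem.Set.contains_iff _ _).mpr hp, ?_⟩
        rw [bne_iff_ne, removable_eq, if_pos h4]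
        norm_num
    have hSB : ∀ p, p ∈ pvScan g rows cols ↔
        p ∈ atPos ∧ pvCnt g rows cols p.1 p.2 < 4 := by
      intro p
      rw [mem_pvScan]
      constructor
      · rintro ⟨hb, hc, h4⟩; exact ⟨(hA p).mpr ⟨hb, hc⟩, h4⟩
      · rintro ⟨hp, h4⟩
        obtain ⟨hb, hc⟩ := (hA p).mp hp
        exact ⟨hb, hc, h4⟩
    have hRS : ∀ p, p ∈ toCheck.filter (fun p =>
        PySem.Set.contains atPos p && removable_at_symbols g p.1 p.2 rows cols != 0) ↔
        p ∈ pvScan g rows cols := fun p => (hRA p).trans (hSB p).symm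
    simp only [pvALoop, pvBLoop]
    set RA := toCheck.filter (fun p =>
        PySem.Set.contains atPos p && removable_at_symbols g p.1 p.2 rows cols != 0) with hRAdef
    set SB := pvScan g rows cols with hSBdef
    by_cases htc : toCheck = []
    · rw [if_pos htc]
      have hscan : SB = [] := by
        rw [List.eq_nil_iff_forall_not_mem]
        intro p hp
        have := hC p ((hSB p).mp hp).1 ((hSB p).mp hp).2
        rw [htc] at this
        exact List.not_mem_nil this
      rw [if_pos hscan]
    · rw [if_neg htc]
      by_cases hre : RA = []
      · have hscan : SB = [] := by
          rw [List.eq_nil_iff_forall_not_mem]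
          intro p hp
          have := (hRS p).mpr hp
          rw [hre] at this
          exact List.not_mem_nil this
        rw [if_pos hre, if_pos hscan]
      · have hsne : SB ≠ [] := by
          obtain ⟨p, hp⟩ := List.exists_mem_of_ne_nil _ hre
          intro hnil
          have := (hRS p).mp hp
          rw [hnil] at this
          exact List.not_mem_nil this
        rw [if_neg hre, if_neg hsne]
        -- shared facts about this round
        have hbRA : ∀ p ∈ RA, pvInB rows cols p :=
          fun p hp => ((hA p).mp ((hRA p).mp hp).1).1
        have hbSB : ∀ p ∈ SB, pvInB rows cols p :=
          fun p hp => ((hA p).mp ((hSB p).mp hp).1).1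
        have hndRA : RA.Nodup := hndC.filter _
        have hperm : RA.Perm SB :=
          (List.perm_ext_iff_of_nodup hndRA (nodup_pvScan g rows cols)).mpr hRS
        have hlen : RA.length = SB.length := hperm.length_eq
        have hgrid : pvRemAll g RA = pvRemAll g SB :=
          pvRemAll_ext rows cols g RA SB hbRA hbSB hs hRS
        have hfull := pvRemAll_full rows cols RA g hbRA hs
        have hs' : pvShape rows cols (pvRemAll g RA) :=
          pvShape_of_map_length rows cols g _ hfull.1 hs
        have hcellI : ∀ p : Int × Int, 0 ≤ p.1 → 0 ≤ p.2 →
            pvCell (pvRemAll g RA) p.1 p.2 =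
              if p ∈ RA then some "." else pvCell g p.1 p.2 := by
          intro p h1 h2
          have hp : ((p.1.toNat : Int), (p.2.toNat : Int)) = p :=
            Prod.ext_iff.mpr ⟨Int.toNat_of_nonneg h1, Int.toNat_of_nonneg h2⟩
          rw [pvCell_toNat _ _ _ h1 h2, hfull.2 p.1.toNat p.2.toNat,
            pvCell_toNat g _ _ h1 h2]
          simp only [hp]
        have hmemA' : ∀ p, p ∈ (RA.foldl (pvPairStep rows cols) (atPos, PySem.Set.empty)).1 ↔
            p ∈ atPos ∧ p ∉ RA := by
          intro p
          rw [pairFold_fst]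
          exact mem_discardFold RA atPos p
        have hA' : ∀ p, p ∈ (RA.foldl (pvPairStep rows cols) (atPos, PySem.Set.empty)).1 ↔
            pvInB rows cols p ∧ pvCell (pvRemAll g RA) p.1 p.2 = some "@" := by
          intro p
          rw [hmemA' p]
          constructor
          · rintro ⟨hp, hnr⟩
            obtain ⟨hb, hc⟩ := (hA p).mp hp
            exact ⟨hb, by rw [hcellI p hb.1 hb.2.2.1, if_neg hnr]; exact hc⟩
          · rintro ⟨hb, hc⟩
            have hnr : p ∉ RA := by
              intro hr
              rw [hcellI p hb.1 hb.2.2.1, if_pos hr] at hc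
              exact absurd (Option.some.inj hc) (by decide)
            rw [hcellI p hb.1 hb.2.2.1, if_neg hnr] at hc
            exact ⟨(hA p).mpr ⟨hb, hc⟩, hnr⟩
        have hC' : ∀ p, p ∈ (RA.foldl (pvPairStep rows cols) (atPos, PySem.Set.empty)).1 →
            pvCnt (pvRemAll g RA) rows cols p.1 p.2 < 4 →
            p ∈ (RA.foldl (pvPairStep rows cols) (atPos, PySem.Set.empty)).2 := by
          intro p hp h4
          obtain ⟨hpa, hnr⟩ := (hmemA' p).mp hp
          obtain ⟨hbp, _⟩ := (hA p).mp hpa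
          have hnot4 : ¬ pvCnt g rows cols p.1 p.2 < 4 :=
            fun h4' => hnr ((hRA p).mpr ⟨hpa, h4'⟩)
          have hex : ∃ d ∈ pvDirs, (p.1 + d.1, p.2 + d.2) ∈ RA := by
            by_contra hno
            push Not at hno
            have hc : pvCnt (pvRemAll g RA) rows cols p.1 p.2 =
                pvCnt g rows cols p.1 p.2 := by
              apply pvCnt_congr
              intro d hd hbnd
              rw [hcellI (p.1 + d.1, p.2 + d.2) hbnd.1 hbnd.2.2.1, if_neg (hno d hd)]
            omega
          obtain ⟨d, hd, hqr⟩ := hex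
          have hq : (p.1 + d.1, p.2 + d.2) ∈ atPos := ((hRA _).mp hqr).1
          obtain ⟨hne0, hd1, hd2, hd3, hd4⟩ := (mem_pvDirs d).mp hd
          have hnbr : pvNbr (p.1 + d.1, p.2 + d.2) p := by
            refine ⟨?_, by dsimp only [pvNbr]; omega, by dsimp only [pvNbr]; omega,
              by dsimp only [pvNbr]; omega, by dsimp only [pvNbr]; omega⟩
            intro he
            rw [Prod.ext_iff] at he
            dsimp only at he
            exact hne0 ⟨by omega, by omega⟩
          exact pairFold_snd_complete rows cols RA atPos PySem.Set.empty _ p hqr hnbr hbp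
            hpa hnr
        have hndA' : (RA.foldl (pvPairStep rows cols) (atPos, PySem.Set.empty)).1.Nodup := by
          rw [pairFold_fst]
          exact nodup_foldl_of_step _ (fun s x hsn => PySem.Set.nodup_discard s x hsn) RA
            atPos hndA
        have hndC' : (RA.foldl (pvPairStep rows cols) (atPos, PySem.Set.empty)).2.Nodup :=
          pairFold_snd_nodup rows cols RA atPos _ List.nodup_nil
        rw [remFold_fst rows cols RA g atPos PySem.Set.empty,
          remFold_snd rows cols RA g atPos PySem.Set.empty]
        have hBgrid : SB.foldl (fun h p => pvSet h p.1 p.2 ".") g = pvRemAll g SB := rfl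
        rw [hBgrid, ← hgrid, ← hlen]
        exact ih (pvRemAll g RA) _ _ (res + RA.length) hs' hA' hC' hndA' hndC'

-- ===== VERDICT (by name: the statement is the Claim_ definition above) =====
theorem solve_part2_differential_spec : Claim_equal_solve_part2_differential := by
  intro data _hdom hpre
  unfold Spec_solve_part2_differential
  by_cases hd : data = []
  · rw [solve_part2_differential, solve_part2_differential_alt, if_pos hd, if_pos hd]
  · rw [solve_part2_differential, solve_part2_differential_alt, if_neg hd, if_neg hd]
    apply loop_eq
    · exact ⟨rfl, Int.natCast_nonneg _, fun r hr => by exact_mod_cast hpre r hr⟩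
    · intro p
      exact mem_pvInitAt (data.length : Int) ((data.headD []).length : Int) data p
    · intro p hp _
      exact hp
    · exact nodup_pvInitAt (data.length : Int) ((data.headD []).length : Int) data
    · exact nodup_pvInitAt (data.length : Int) ((data.headD []).length : Int) data
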